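-- pv_equiv track=rewrite | github.com/sibyl-oracles/onit | src/container_launcher.py | _port_args
-- ===== SOURCE A (Python) =====
-- def _extract_port(args: list[str], flag: str, default: int) -> int:
--     """Return the integer value following ``flag`` in ``args``, or ``default``.
--
--     Accepts both ``--flag 9500`` and ``--flag=9500`` forms.
--     """
--     prefix = f"{flag}="
--     for i, tok in enumerate(args):
--         if tok == flag and i + 1 < len(args):
--             try:
--                 return int(args[i + 1])
--             except ValueError:
--                 return default
--         if tok.startswith(prefix):
--             try:
--                 return int(tok.split("=", 1)[1])
--             except ValueError:
--                 return default
--     return default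
--
-- def _port_args(forwarded_args: list[str]) -> list[str]:
--     """Map only the ports needed by the selected mode, honoring user overrides."""
--     ports: list[str] = []
--     if "--web" in forwarded_args:
--         p = _extract_port(forwarded_args, "--web-port", 9000)
--         ports.extend(["-p", f"{p}:{p}"])
--     if "--a2a" in forwarded_args:
--         p = _extract_port(forwarded_args, "--a2a-port", 9001)
--         ports.extend(["-p", f"{p}:{p}"])
--     if "--gateway" in forwarded_args or any(
--         t == "--viber-port" or t.startswith("--viber-port=") for t in forwarded_args
--     ):
--         p = _extract_port(forwarded_args, "--viber-port", 8443)
--         ports.extend(["-p", f"{p}:{p}"])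
--     return ports
-- ===== SOURCE B (Python) =====
-- def _match(tok: str, i: int, args: list[str], flag: str):
--     """First-form / =-form value of ``flag`` at position ``i``, else None."""
--     if tok == flag and i + 1 < len(args):
--         return args[i + 1]
--     if tok.startswith(flag + "="):
--         return tok.split("=", 1)[1]
--     return None
--
--
-- def _port_args(forwarded_args: list[str]) -> list[str]:
--     """Map only the ports needed by the selected mode, honoring user overrides."""
--     w = a = v = None
--     for i, tok in enumerate(forwarded_args):
--         if w is None:
--             w = _match(tok, i, forwarded_args, "--web-port")
--         if a is None:
--             a = _match(tok, i, forwarded_args, "--a2a-port")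
--         if v is None:
--             v = _match(tok, i, forwarded_args, "--viber-port")
--
--     def to_port(raw, default):
--         if raw is None:
--             return default
--         try:
--             return int(raw)
--         except ValueError:
--             return default
--
--     ports: list[str] = []
--     if "--web" in forwarded_args:
--         p = to_port(w, 9000)
--         ports.extend(["-p", f"{p}:{p}"])
--     if "--a2a" in forwarded_args:
--         p = to_port(a, 9001)
--         ports.extend(["-p", f"{p}:{p}"])
--     if "--gateway" in forwarded_args or v is not None or "--viber-port" in forwarded_args:
--         p = to_port(v, 8443)
--         ports.extend(["-p", f"{p}:{p}"])
--     return ports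
-- ===== Notes on version B (the rewrite author's own statement) =====
-- stated objective: simpler
-- what changed: A rescans the whole argument list once per active mode via _extract_port; B makes a single pass that records the first raw value for each of the three port flags and then just looks the values up per mode.
import Mathlib
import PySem

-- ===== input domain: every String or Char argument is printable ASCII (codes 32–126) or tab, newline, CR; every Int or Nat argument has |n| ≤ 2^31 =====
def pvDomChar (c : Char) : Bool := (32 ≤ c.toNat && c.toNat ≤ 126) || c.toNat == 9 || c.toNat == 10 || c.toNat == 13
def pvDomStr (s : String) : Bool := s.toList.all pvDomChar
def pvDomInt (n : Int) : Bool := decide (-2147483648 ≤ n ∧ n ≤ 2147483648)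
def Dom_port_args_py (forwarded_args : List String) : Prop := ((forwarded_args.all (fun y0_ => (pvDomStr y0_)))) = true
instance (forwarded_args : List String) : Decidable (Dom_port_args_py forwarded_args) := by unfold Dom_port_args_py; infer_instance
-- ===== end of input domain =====

-- B replaces A's three repeated scans (_extract_port) by ONE pass that records the first
-- raw value seen for each of the three port flags; same return value, simpler decomposition.

-- ===== PORT A =====
-- tok.split("=", 1)[1]; the [1] is exact under the startswith guard ("=" occurs in tok, so piece 1 exists)
def aSplitVal (tok : String) : String :=
  PySem.List.pyGetD ((PySem.Str.splitMax? tok "=" 1).getD []) 1 ""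

-- the 'for i, tok in enumerate(args)' loop of _extract_port; i is the index of the current suffix
def extractLoop (args : List String) (flag : String) (dflt : Int) : List String → Nat → Int
  | [], _ => dflt
  | tok :: rest, i =>
    if tok == flag && decide (i + 1 < args.length) then
      match PySem.Int.ofStr? (PySem.List.pyGetD args ((i : Int) + 1) "") with
      | some n => n
      | none => dflt
    else if PySem.Str.startswith tok (flag ++ "=") then
      match PySem.Int.ofStr? (aSplitVal tok) with
      | some n => n
      | none => dflt
    else extractLoop args flag dflt rest (i + 1)

def extractPort (args : List String) (flag : String) (dflt : Int) : Int :=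
  extractLoop args flag dflt args 0

def port_args_py (forwarded_args : List String) : List String :=
  let ports : List String := []
  let ports := if forwarded_args.contains "--web" then
      let p := extractPort forwarded_args "--web-port" 9000
      ports ++ ["-p", PySem.Int.toStr p ++ ":" ++ PySem.Int.toStr p]
    else ports
  let ports := if forwarded_args.contains "--a2a" then
      let p := extractPort forwarded_args "--a2a-port" 9001
      ports ++ ["-p", PySem.Int.toStr p ++ ":" ++ PySem.Int.toStr p]
    else ports
  let ports := if forwarded_args.contains "--gateway" ||
      forwarded_args.any (fun t => t == "--viber-port" || PySem.Str.startswith t "--viber-port=") then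
      let p := extractPort forwarded_args "--viber-port" 8443
      ports ++ ["-p", PySem.Int.toStr p ++ ":" ++ PySem.Int.toStr p]
    else ports
  ports

-- ===== PORT B =====
-- _match(tok, i, args, flag) of Source B
def matchTok (tok : String) (i : Nat) (args : List String) (flag : String) : Option String :=
  if tok == flag && decide (i + 1 < args.length) then
    some (PySem.List.pyGetD args ((i : Int) + 1) "")
  else if PySem.Str.startswith tok (flag ++ "=") then
    some (PySem.List.pyGetD ((PySem.Str.splitMax? tok "=" 1).getD []) 1 "")
  else none

-- the single 'for i, tok in enumerate(forwarded_args)' pass, carrying (w, a, v)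
def scanLoop (args : List String) : List String → Nat →
    Option String × Option String × Option String → Option String × Option String × Option String
  | [], _, s => s
  | tok :: rest, i, (w, a, v) =>
    let w := if w.isNone then matchTok tok i args "--web-port" else w
    let a := if a.isNone then matchTok tok i args "--a2a-port" else a
    let v := if v.isNone then matchTok tok i args "--viber-port" else v
    scanLoop args rest (i + 1) (w, a, v)

-- to_port(raw, default) of Source B
def toPort (raw : Option String) (dflt : Int) : Int :=
  match raw with
  | none => dflt
  | some s =>
    match PySem.Int.ofStr? s with
    | some n => n
    | none => dflt

def port_args_py_alt (forwarded_args : List String) : List String :=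
  let wav := scanLoop forwarded_args forwarded_args 0 (none, none, none)
  let ports : List String := []
  let ports := if forwarded_args.contains "--web" then
      let p := toPort wav.1 9000
      ports ++ ["-p", PySem.Int.toStr p ++ ":" ++ PySem.Int.toStr p]
    else ports
  let ports := if forwarded_args.contains "--a2a" then
      let p := toPort wav.2.1 9001
      ports ++ ["-p", PySem.Int.toStr p ++ ":" ++ PySem.Int.toStr p]
    else ports
  let ports := if forwarded_args.contains "--gateway" || wav.2.2.isSome ||
      forwarded_args.contains "--viber-port" then
      let p := toPort wav.2.2 8443
      ports ++ ["-p", PySem.Int.toStr p ++ ":" ++ PySem.Int.toStr p]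
    else ports
  ports

-- ===== PRECONDITION & SPEC =====
def Spec_port_args_py (forwarded_args : List String) (out : List String) : Prop := out = port_args_py_alt forwarded_args
instance (forwarded_args : List String) (out : List String) : Decidable (Spec_port_args_py forwarded_args out) := by unfold Spec_port_args_py; infer_instance

-- ===== CLAIM (what is proved, stated in full; the proofs are below) =====
def Claim_equal_port_args_py : Prop := ∀ (forwarded_args : List String), Dom_port_args_py forwarded_args → Spec_port_args_py forwarded_args (port_args_py forwarded_args)

-- ===== LEMMAS AND PROOFS =====

-- the first raw value a scan for `flag` starting at suffix `l` (index i) records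
def fm (args : List String) (flag : String) : List String → Nat → Option String
  | [], _ => none
  | tok :: rest, i =>
    match matchTok tok i args flag with
    | some r => some r
    | none => fm args flag rest (i + 1)

lemma extractLoop_eq_fm (args : List String) (flag : String) (dflt : Int) :
    ∀ (l : List String) (i : Nat), extractLoop args flag dflt l i = toPort (fm args flag l i) dflt := by
  intro l
  induction l with
  | nil => intro i; simp [extractLoop, fm, toPort]
  | cons tok rest ih =>
    intro i
    simp only [extractLoop, fm, matchTok]
    split_ifs with h1 h2 <;> simp [toPort, ih, aSplitVal]

lemma scanLoop_eq_fm (args : List String) :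
    ∀ (l : List String) (i : Nat) (w a v : Option String),
      scanLoop args l i (w, a, v) =
        (w.or (fm args "--web-port" l i), a.or (fm args "--a2a-port" l i), v.or (fm args "--viber-port" l i)) := by
  intro l
  induction l with
  | nil => intro i w a v; simp [scanLoop, fm]
  | cons tok rest ih =>
    intro i w a v
    simp only [scanLoop, fm]
    rw [ih]
    cases w <;> cases a <;> cases v <;>
      cases hw : matchTok tok i args "--web-port" <;>
      cases ha : matchTok tok i args "--a2a-port" <;>
      cases hv : matchTok tok i args "--viber-port" <;>
      simp [Option.or]

lemma any_viber_eq_fm (args : List String) :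
    ∀ (l : List String) (i : Nat),
      (l.any (fun t => t == "--viber-port" || PySem.Str.startswith t "--viber-port=")) =
        ((fm args "--viber-port" l i).isSome || l.contains "--viber-port") := by
  intro l
  induction l with
  | nil => intro i; simp [fm]
  | cons tok rest ih =>
    intro i
    have happ : ("--viber-port" ++ "=" : String) = "--viber-port=" := rfl
    simp only [List.any_cons, fm, List.contains_cons]
    cases hm : matchTok tok i args "--viber-port" with
    | some r =>
      unfold matchTok at hm
      rw [happ] at hm
      split_ifs at hm with h1 h2
      · have ht : (tok == "--viber-port") = true := ((Bool.and_eq_true _ _).mp h1).1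
        rw [ht]
        simp
      · rw [h2]
        simp
    | none =>
      unfold matchTok at hm
      rw [happ] at hm
      split_ifs at hm with h1 h2
      by_cases he : tok = "--viber-port"
      · subst he; simp
      · rw [Bool.not_eq_true] at h2
        rw [h2]
        have h5 : (tok == "--viber-port") = false := by simp [he]
        have h6 : ("--viber-port" == tok) = false := by simpa using Ne.symm he
        simp only [h5, h6, Bool.or_false, Bool.false_or, ih (i + 1)]

lemma extractPort_eq (args : List String) (flag : String) (dflt : Int) :
    extractPort args flag dflt = toPort (fm args flag args 0) dflt := by
  simp [extractPort, extractLoop_eq_fm]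

-- ===== VERDICT (by name: the statement is the Claim_ definition above) =====
theorem port_args_py_spec : Claim_equal_port_args_py := by
  intro fa _
  show port_args_py fa = port_args_py_alt fa
  simp only [port_args_py, port_args_py_alt, scanLoop_eq_fm, Option.or, extractPort_eq]
  rw [any_viber_eq_fm fa fa 0]
  simp only [Bool.or_assoc]
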